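-- pv_equiv track=rewrite | github.com/quantnlp/Weibo_finance | dict_creat.py | count_sentence_length
-- ===== SOURCE A (Python) =====
-- def count_sentence_length(string):
--     """
--     Count number of sentences for each sentence length.
--
--     :return: count. There are count[i] sentences with length i.
--     """
--     split_mark = "#"
--     sentences = string.split(split_mark)
--     length = [len(string) for string in sentences]
--     max_length = max(length)
--
--     count = [0]*(max_length+1)
--     for l in length:
--         count[l] += 1
--
--     return count
-- ===== SOURCE B (Python) =====
-- def count_sentence_length(string):
--     """
--     Count number of sentences for each sentence length.
--
--     :return: count. There are count[i] sentences with length i.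
--     """
--     count = []
--     for l in sorted(len(s) for s in string.split("#")):
--         while len(count) <= l:
--             count.append(0)
--         count[-1] += 1
--     return count
-- ===== Notes on version B (the rewrite author's own statement) =====
-- stated objective: alternative
-- what changed: Instead of computing max, preallocating a zero array and tallying by random-index increments, B sorts the lengths and builds the histogram incrementally: for each length in ascending order it pads the list with zeros up to that index and bumps the last cell, needing no max() pass and no preallocation.
import Mathlib
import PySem

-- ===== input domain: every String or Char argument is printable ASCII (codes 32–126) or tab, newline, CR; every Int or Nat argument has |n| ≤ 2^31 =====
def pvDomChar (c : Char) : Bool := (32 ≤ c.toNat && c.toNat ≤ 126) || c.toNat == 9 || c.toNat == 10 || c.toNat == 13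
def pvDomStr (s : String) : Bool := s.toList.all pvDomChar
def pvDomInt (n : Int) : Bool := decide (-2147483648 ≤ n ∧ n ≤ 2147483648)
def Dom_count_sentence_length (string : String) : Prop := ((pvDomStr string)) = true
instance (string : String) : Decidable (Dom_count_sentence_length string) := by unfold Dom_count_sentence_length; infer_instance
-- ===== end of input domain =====

-- B sorts the lengths and grows the histogram on demand (pad with zeros, bump the last cell),
-- with no max computation and no preallocated array (alternative decomposition, not faster).

-- ===== PORT A =====
-- Python's max raises only on an empty list; str.split always returns a nonempty list,
-- so the 'none' arm below is unreachable.
def count_sentence_length (string : String) : List Int :=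
  let split_mark := "#"
  let sentences := (PySem.Str.split? string split_mark).getD []
  let length := sentences.map (fun s => PySem.Str.len s)
  match PySem.List.max? length id with
  | none => []
  | some max_length =>
    let count := List.replicate (max_length + 1).toNat (0 : Int)
    -- count[l] += 1 : pySetD/pyGetD are exact here (0 ≤ l ≤ max_length keeps the index in range)
    length.foldl (fun count l => PySem.List.pySetD count l (PySem.List.pyGetD count l 0 + 1)) count

-- ===== PORT B =====
-- 'while len(count) <= l: count.append(0)'
def pvPad (count : List Int) (l : Int) : List Int :=
  if (count.length : Int) ≤ l then pvPad (count ++ [0]) l else count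
termination_by (l + 1 - count.length).toNat
decreasing_by simp only [List.length_append, List.length_cons, List.length_nil]; omega

-- one iteration of the for-loop body: pad, then 'count[-1] += 1'
def pvBump (count : List Int) (l : Int) : List Int :=
  let count := pvPad count l
  PySem.List.pySetD count (-1) (PySem.List.pyGetD count (-1) 0 + 1)

def count_sentence_length_alt (string : String) : List Int :=
  (PySem.List.sorted (((PySem.Str.split? string "#").getD []).map
      (fun s => PySem.Str.len s)) (fun x => x) false).foldl pvBump []

-- ===== PRECONDITION & SPEC =====
def Spec_count_sentence_length (string : String) (out : List Int) : Prop := out = count_sentence_length_alt string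
instance (string : String) (out : List Int) : Decidable (Spec_count_sentence_length string out) := by unfold Spec_count_sentence_length; infer_instance

-- ===== CLAIM (what is proved, stated in full; the proofs are below) =====
def Claim_equal_count_sentence_length : Prop := ∀ (string : String), Dom_count_sentence_length string → Spec_count_sentence_length string (count_sentence_length string)

-- ===== LEMMAS AND PROOFS =====

-- A-side: the tally fold preserves the array length
theorem pv_foldl_length (L : List Int) (c : List Int) :
    (L.foldl (fun count l => PySem.List.pySetD count l (PySem.List.pyGetD count l 0 + 1)) c).length
      = c.length := by
  induction L generalizing c with
  | nil => rfl
  | cons l L ih => simp [List.foldl, ih, PySem.List.length_pySetD]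

-- A-side: elementwise value of the tally fold
theorem pv_foldl_get (L : List Int) (j : Nat) (c : List Int)
    (h : ∀ l ∈ L, 0 ≤ l ∧ l < (c.length : Int)) (hj : j < c.length) :
    PySem.List.pyGetD (L.foldl (fun count l => PySem.List.pySetD count l (PySem.List.pyGetD count l 0 + 1)) c) (j : Int) 0
      = PySem.List.pyGetD c (j : Int) 0 + L.count (j : Int) := by
  induction L generalizing c with
  | nil => simp [List.foldl]
  | cons l L ih =>
    have hl := h l (by simp)
    have hlen : (PySem.List.pySetD c l (PySem.List.pyGetD c l 0 + 1)).length = c.length :=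
      PySem.List.length_pySetD ..
    have hrec := ih (PySem.List.pySetD c l (PySem.List.pyGetD c l 0 + 1))
      (by intro x hx; rw [hlen]; exact h x (by simp [hx])) (by omega)
    rw [List.foldl_cons, hrec]
    have hln : l = ((l.toNat : Nat) : Int) := by omega
    rw [hln, PySem.List.pyGetD_pySetD_natCast c l.toNat j _ _ (by omega)]
    by_cases hje : j = l.toNat
    · simp [hje]
      omega
    · simp [hje, List.count_cons]
      omega

-- B-side: count[-1] = v on a nonempty list sets the last element
theorem pv_pySetD_neg_one (xs : List Int) (v : Int) (h : xs ≠ []) :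
    PySem.List.pySetD xs (-1) v = xs.set (xs.length - 1) v := by
  simp only [PySem.List.pySetD, PySem.List.pySet?, PySem.List.pyIdx?]
  have : 1 ≤ xs.length := List.length_pos_of_ne_nil h
  split <;> simp_all <;> omega

theorem pvPad_length (count : List Int) (l : Int) :
    ((pvPad count l).length : Int) = max (count.length : Int) (l + 1) := by
  fun_induction pvPad count l with
  | case1 count h ih => simp only [List.length_append, List.length_cons, List.length_nil] at ih ⊢; omega
  | case2 count h => omega

theorem pvPad_getD (count : List Int) (l : Int) (j : Nat) :
    PySem.List.pyGetD (pvPad count l) (j : Int) 0 = PySem.List.pyGetD count (j : Int) 0 := by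
  fun_induction pvPad count l with
  | case1 count h ih =>
    rw [ih]
    simp only [PySem.List.pyGetD_natCast]
    rcases lt_trichotomy j count.length with hj | hj | hj
    · simp [List.getD_eq_getElem?_getD, List.getElem?_append, hj]
    · subst hj; simp [List.getD_eq_getElem?_getD, List.getElem?_append_right]
    · rw [List.getD_eq_default _ _ (by simp; omega), List.getD_eq_default _ _ (by omega)]
  | case2 count h => rfl

-- one loop-body step adds 1 exactly at index l
theorem pvBump_getD (count : List Int) (l : Int) (hl0 : 0 ≤ l)
    (hub : (count.length : Int) ≤ l + 1) (j : Nat) :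
    PySem.List.pyGetD (pvBump count l) (j : Int) 0
      = PySem.List.pyGetD count (j : Int) 0 + (if (j : Int) = l then 1 else 0) := by
  have hplen : ((pvPad count l).length : Int) = l + 1 := by rw [pvPad_length]; omega
  have hpne : pvPad count l ≠ [] := by
    intro hc; rw [hc] at hplen; simp at hplen; omega
  have hpd : ∀ k : Nat, (pvPad count l).getD k 0 = count.getD k 0 := by
    intro k
    have := pvPad_getD count l k
    simpa using this
  have hlastval : PySem.List.pyGetD (pvPad count l) (-1) 0 = (pvPad count l).getD l.toNat 0 := by
    rw [PySem.List.pyGetD_neg_one _ _ hpne, List.getLast_eq_getElem,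
        List.getD_eq_getElem _ _ (by omega)]
    congr 1
    omega
  unfold pvBump
  simp only []
  rw [pv_pySetD_neg_one _ _ hpne, hlastval]
  simp only [PySem.List.pyGetD_natCast]
  have hl' : (pvPad count l).length - 1 = l.toNat := by omega
  rw [hl']
  by_cases hje : j = l.toNat
  · subst hje
    rw [if_pos (by omega)]
    have h := hpd l.toNat
    simp only [List.getD_eq_getElem?_getD] at h
    simp [List.getD_eq_getElem?_getD, List.getElem?_set,
      (show l.toNat < (pvPad count l).length by omega), h]
    rw [← h]
    simp [List.getElem?_eq_getElem (show l.toNat < (pvPad count l).length by omega)]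
  · rw [if_neg (by omega)]
    simp only [List.getD_eq_getElem?_getD, List.getElem?_set, if_neg (Ne.symm hje)]
    rw [← List.getD_eq_getElem?_getD, hpd]
    simp [List.getD_eq_getElem?_getD]

theorem pvBump_length (count : List Int) (l : Int)
    (hub : (count.length : Int) ≤ l + 1) :
    ((pvBump count l).length : Int) = l + 1 := by
  unfold pvBump
  simp only [PySem.List.length_pySetD]
  rw [pvPad_length]; omega

-- the whole B fold, elementwise
theorem pvB_fold_getD (L : List Int) (count : List Int)
    (hs : L.Pairwise (· ≤ ·)) (hnn : ∀ l ∈ L, 0 ≤ l)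
    (hub : ∀ l ∈ L, (count.length : Int) ≤ l + 1) (j : Nat) :
    PySem.List.pyGetD (L.foldl pvBump count) (j : Int) 0
      = PySem.List.pyGetD count (j : Int) 0 + L.count (j : Int) := by
  induction L generalizing count with
  | nil => simp
  | cons l L ih =>
    have hl0 : 0 ≤ l := hnn l (by simp)
    have hubl : (count.length : Int) ≤ l + 1 := hub l (by simp)
    have hlen : ((pvBump count l).length : Int) = l + 1 := pvBump_length count l hubl
    rw [List.foldl_cons,
      ih (pvBump count l) (List.Pairwise.of_cons hs) (fun x hx => hnn x (by simp [hx]))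
        (fun x hx => by
          have := (List.pairwise_cons.mp hs).1 x hx
          omega),
      pvBump_getD count l hl0 hubl j]
    by_cases hje : (j : Int) = l
    · simp [List.count_cons, hje]; omega
    · simp [List.count_cons, hje, Ne.symm hje]

-- the whole B fold, length: it ends at (last element) + 1
theorem pvB_fold_length (L : List Int) (count : List Int)
    (hs : L.Pairwise (· ≤ ·))
    (hub : ∀ l ∈ L, (count.length : Int) ≤ l + 1) (hne : L ≠ []) :
    ((L.foldl pvBump count).length : Int) = L.getLast hne + 1 := by
  induction L generalizing count with
  | nil => exact absurd rfl hne
  | cons l L ih =>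
    have hlen : ((pvBump count l).length : Int) = l + 1 :=
      pvBump_length count l (hub l (by simp))
    cases L with
    | nil => simpa using hlen
    | cons l' L' =>
      rw [List.foldl_cons, List.getLast_cons (by simp)]
      exact ih (pvBump count l) (List.Pairwise.of_cons hs)
        (fun x hx => by
          have := (List.pairwise_cons.mp hs).1 x hx
          omega) (by simp)

-- in a ≤-sorted list every element is at most the last one
theorem pv_le_getLast (xs : List Int) (hs : xs.Pairwise (· ≤ ·)) (hne : xs ≠ [])
    (y : Int) (hy : y ∈ xs) : y ≤ xs.getLast hne := by
  induction xs with
  | nil => exact absurd rfl hne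
  | cons x xs ih =>
    cases xs with
    | nil => simp_all
    | cons x' xs' =>
      rw [List.getLast_cons (by simp)]
      rcases List.mem_cons.mp hy with rfl | hy'
      · exact (List.pairwise_cons.mp hs).1 _ (List.getLast_mem (by simp))
      · exact ih (List.Pairwise.of_cons hs) (by simp) hy'

-- ===== VERDICT (by name: the statement is the Claim_ definition above) =====
theorem count_sentence_length_spec : Claim_equal_count_sentence_length := by
  intro s _
  unfold Spec_count_sentence_length count_sentence_length count_sentence_length_alt
  simp only []
  set lengths := (((PySem.Str.split? s "#").getD []).map (fun t => PySem.Str.len t)) with hLdef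
  cases hm : PySem.List.max? lengths id with
  | none =>
    have h0 : lengths = [] := (PySem.List.max?_eq_none_iff _ _).mp hm
    rw [h0, (PySem.List.sorted_eq_nil_iff ([] : List Int) _ _).mpr rfl]
    rfl
  | some m =>
    have hpos : ∀ l ∈ lengths, 0 ≤ l := by
      intro l hl
      rcases List.mem_map.mp hl with ⟨t, _, rfl⟩
      simp [PySem.Str.len_eq]
    have hmax := PySem.List.max?_isMax hm
    have hmem := PySem.List.max?_mem hm
    have hm0 : (0 : Int) ≤ m := hpos m hmem
    set S := PySem.List.sorted lengths (fun x => x) false with hSdef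
    have hSperm : S.Perm lengths := PySem.List.sorted_perm ..
    have hSpw : S.Pairwise (· ≤ ·) := PySem.List.sorted_pairwise ..
    have hSne : S ≠ [] := by
      intro hc
      have : lengths = [] := (PySem.List.sorted_eq_nil_iff _ _ _).mp (hSdef ▸ hc)
      rw [this] at hmem; simp at hmem
    have hSnn : ∀ l ∈ S, 0 ≤ l := fun l hl => hpos l (hSperm.mem_iff.mp hl)
    have hub : ∀ l ∈ S, ((([] : List Int).length : Int)) ≤ l + 1 := by
      intro l hl; have := hSnn l hl; simp; omega
    -- last of the sorted list is the max
    have hlast : S.getLast hSne = m := by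
      have h1 : S.getLast hSne ≤ m :=
        hmax _ (hSperm.mem_iff.mp (List.getLast_mem hSne))
      have h2 : m ≤ S.getLast hSne :=
        pv_le_getLast S hSpw hSne m (hSperm.mem_iff.mpr hmem)
      omega
    have hBlen : ((S.foldl pvBump []).length : Int) = m + 1 := by
      rw [pvB_fold_length S [] hSpw hub hSne, hlast]
    apply List.ext_getElem
    · have hlenA := pv_foldl_length lengths (List.replicate (m + 1).toNat (0 : Int))
      simp only [hlenA, List.length_replicate]
      omega
    · intro j h1 h2
      have hlenA : (List.replicate (m + 1).toNat (0 : Int)).length = (m + 1).toNat := by simp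
      have hget := pv_foldl_get lengths j (List.replicate (m + 1).toNat (0 : Int))
        (by
          intro l hl
          refine ⟨hpos l hl, ?_⟩
          have := hmax l hl
          simp only [id] at this
          rw [hlenA]; omega)
        (by
          rw [hlenA]
          rw [pv_foldl_length, hlenA] at h1
          omega)
      rw [PySem.List.pyGetD_eq_getElem _ 0 (by omega) (by
        rw [pv_foldl_length, hlenA]
        rw [pv_foldl_length, hlenA] at h1
        omega)] at hget
      simp only [Int.toNat_natCast] at hget
      rw [hget]
      rw [PySem.List.pyGetD_eq_getElem _ 0 (by omega) (by rw [hlenA]; rw [pv_foldl_length, hlenA] at h1; omega)]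
      simp only [Int.toNat_natCast, List.getElem_replicate]
      have hgetB := pvB_fold_getD S [] hSpw hSnn hub j
      rw [PySem.List.pyGetD_eq_getElem _ 0 (by omega) (by exact_mod_cast h2)] at hgetB
      simp only [Int.toNat_natCast] at hgetB
      rw [hgetB]
      simp [hSperm.count_eq]
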